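-- pv_equiv track=rewrite | github.com/HALFpipe/RAMP | src/gwas/src/gwas/meta/index.py | parse
-- ===== SOURCE A (Python) =====
-- from typing import Iterable, Iterator, Mapping, MutableSequence, TypeVar
--
-- def tokenize(stem: str) -> tuple[MutableSequence[str | None], MutableSequence[str]]:
--     tokens = stem.split("_")
--     keys: MutableSequence[str | None] = list()
--     values: MutableSequence[str] = list()
--     for token in tokens:
--         if "-" in token:  # A bids tag
--             key = token.split("-")[0]
--             keys.append(key)
--             values.append(token[len(key) + 1 :])
--         else:  # A suffix
--             keys.append(None)
--             values.append(token)
--     return keys, values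
--
-- def get_suffix(keys: MutableSequence[str | None], values: MutableSequence[str]) -> str:
--     suffixes: list[str] = list()
--     while keys and keys[-1] is None:
--         keys.pop(-1)
--         suffixes.insert(0, values.pop(-1))
--
--     suffix = "_".join(suffixes)
--
--     # # Merge other suffixes with their preceding tag value
--     # for i in reversed(range(1, len(keys))):
--     #     if keys[i] is None:
--     #         values[i - 1] += f"_{values[i]}"
--
--     # Merge other suffixes with the next key value
--     prefix: str = ""
--     for i in range(len(keys) - 1):
--         if keys[i] is None:
--             prefix += f"{values[i]}_"
--         else:
--             keys[i] = f"{prefix}{keys[i]}"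
--             prefix = ""
--
--     return suffix
--
-- def parse(phenotype: str) -> Iterator[tuple[str, str]]:
--     keys, values = tokenize(phenotype)
--
--     suffix = get_suffix(keys, values)
--
--     for key, value in zip(keys, values, strict=False):
--         if key is None:
--             continue
--         yield (key, value)
--
--     if suffix:
--         yield ("suffix", suffix)
-- ===== SOURCE B (Python) =====
-- def parse(phenotype):
--     tokens = phenotype.split("_")
--     run = 0
--     for t in reversed(tokens):
--         if "-" in t:
--             break
--         run += 1
--     m = len(tokens) - run
--     suffix = "_".join(tokens[m:])
--     prefix = ""
--     for t in tokens[:m]: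
--         if "-" in t:
--             key, value = t.split("-", 1)
--             yield (prefix + key, value)
--             prefix = ""
--         else:
--             prefix += t + "_"
--     if suffix:
--         yield ("suffix", suffix)
-- ===== Notes on version B (the rewrite author's own statement) =====
-- stated objective: simpler
-- what changed: B replaces A's three-phase pipeline (tokenize into parallel key/value lists, destructively pop trailing suffix tokens, then an index loop mutating the key list before a zip-and-filter pass) by a single left-to-right streaming pass over the underscore-separated tokens that carries a running prefix, after locating the trailing plain-token run once; B also merges a pending plain-token prefix into the key of the LAST tag, which A's range(len(keys)-1) loop misses.
-- intended difference: On stems where the token immediately before the last dash-tag token is plain (dash-free), A never merges the pending plain prefix into that last key and silently drops those plain tokens (witness: on pvDiffWitness_parse A keeps only the bare key), while B merges them into that key, which is the intended behaviour: it is how A itself treats every non-final tag and what A's own in-source comment about merging suffixes into the next key value describes. — e.g. on parse("a_b-1"): A returns [("b", "1")], B returns [("a_b", "1")]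
import Mathlib
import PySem

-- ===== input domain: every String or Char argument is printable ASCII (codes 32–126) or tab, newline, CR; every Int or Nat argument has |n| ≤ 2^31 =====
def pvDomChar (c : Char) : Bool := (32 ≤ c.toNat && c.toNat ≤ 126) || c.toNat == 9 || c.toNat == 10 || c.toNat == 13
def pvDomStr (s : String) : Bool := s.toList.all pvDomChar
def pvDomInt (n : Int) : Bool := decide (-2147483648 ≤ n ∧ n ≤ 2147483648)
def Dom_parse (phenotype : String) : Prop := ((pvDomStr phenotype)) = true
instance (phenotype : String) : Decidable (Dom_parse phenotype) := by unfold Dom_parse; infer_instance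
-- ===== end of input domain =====

-- B re-parses the stem in one streaming pass and (intendedly) merges a plain token into the
-- key of the FOLLOWING tag uniformly, where A's `range(len(keys) - 1)` loop skips the last tag.

-- ===== PORT A =====
-- tokenize: for each underscore-separated token, a tag contributes (key before first '-', rest), a plain token (None, token)
def pvTokenizeA (tokens : List (List Char)) : List (Option (List Char)) × List (List Char) :=
  tokens.foldl (fun acc t =>
    if PySem.Chars.isIn ['-'] t then
      let key := (PySem.Chars.splitOn t ['-']).headD []
      (acc.1 ++ [some key], acc.2 ++ [PySem.List.slice t (some ((key.length : Int) + 1)) none])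
    else (acc.1 ++ [none], acc.2 ++ [t])) ([], [])

-- get_suffix's `while keys and keys[-1] is None: … pop …` (vs.getLast?.getD [] : vs is never
-- empty when ks is not — same lengths — so the getD is only a totality guard)
def pvPopA : Nat → List (Option (List Char)) → List (List Char) → List (List Char) →
    List (Option (List Char)) × List (List Char) × List (List Char)
  | 0, ks, vs, sfx => (ks, vs, sfx)
  | fuel + 1, ks, vs, sfx =>
    if ks.getLast? = some none then
      pvPopA fuel ks.dropLast vs.dropLast (vs.getLast?.getD [] :: sfx)
    else (ks, vs, sfx)

-- get_suffix's `for i in range(len(keys) - 1)` prefix loop (runs over all but the last entry)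
def pvPrefixA : List Char → List (Option (List Char) × List Char) → List (Option (List Char))
  | _, [] => []
  | pre, (none, v) :: rest => none :: pvPrefixA (pre ++ v ++ ['_']) rest
  | pre, (some k, _) :: rest => some (pre ++ k) :: pvPrefixA [] rest

def parse (phenotype : String) : List (String × String) :=
  let tokens := PySem.Chars.splitOn phenotype.toList ['_']
  let kv := pvTokenizeA tokens
  let pop := pvPopA kv.1.length kv.1 kv.2 []
  let suffix := PySem.Chars.join ['_'] pop.2.2
  let keys := pvPrefixA [] (pop.1.zip pop.2.1).dropLast ++ pop.1.drop (pop.1.length - 1)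
  let pairs := (keys.zip pop.2.1).foldl (fun acc kv =>
    match kv.1 with
    | some k => acc ++ [(String.ofList k, String.ofList kv.2)]
    | none => acc) []
  if suffix ≠ [] then pairs ++ [("suffix", String.ofList suffix)] else pairs

-- ===== PORT B =====
-- one streaming pass: a plain token extends the pending prefix, a tag token emits
-- (prefix + key-before-first-dash, rest-after-first-dash) and resets the prefix
def pvEmitB : List Char → List (List Char) → List (String × String)
  | _, [] => []
  | pre, t :: rest =>
    if PySem.Chars.isIn ['-'] t then
      (String.ofList (pre ++ t.takeWhile (· ≠ '-')), String.ofList ((t.dropWhile (· ≠ '-')).drop 1))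
        :: pvEmitB [] rest
    else pvEmitB (pre ++ t ++ ['_']) rest

def parse_alt (phenotype : String) : List (String × String) :=
  let tokens := PySem.Chars.splitOn phenotype.toList ['_']
  let run := (tokens.reverse.takeWhile (fun t => !PySem.Chars.isIn ['-'] t)).length
  let m := tokens.length - run
  let suffix := PySem.Chars.join ['_'] (tokens.drop m)
  pvEmitB [] (tokens.take m) ++ (if suffix ≠ [] then [("suffix", String.ofList suffix)] else [])

-- ===== PRECONDITION & SPEC =====
-- On stems where the token just before the LAST dash-tag token is plain (dash-free), A's
-- prefix loop over range(len(keys) - 1) never merges the accumulated plain prefix into that last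
-- tag's key, silently dropping those plain tokens (see pvDiffWitnessOut_parse below), while B
-- merges them into the following key, exactly as A itself treats every non-final tag and as A's
-- own in-source comment about merging suffixes into the next key value intends.
-- (i ranges over the underscore-separated tokens of the stem: token i is the LAST dash-tag, token i-1 is plain)
def D_parse (phenotype : String) : Prop :=
  let L := PySem.Chars.splitOn phenotype.toList ['_']
  ∃ i < L.length, 1 ≤ i ∧ (L[i]?.getD []).contains '-' ∧ ¬(L[i - 1]?.getD []).contains '-' ∧
    ∀ j < L.length, i < j → ¬(L[j]?.getD []).contains '-' 
instance (phenotype : String) : Decidable (D_parse phenotype) := by unfold D_parse; infer_instance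

def Spec_parse (phenotype : String) (out : List (String × String)) : Prop :=
  ¬ D_parse phenotype → out = parse_alt phenotype
instance (phenotype : String) (out : List (String × String)) : Decidable (Spec_parse phenotype out) := by
  unfold Spec_parse; infer_instance

def pvDiffWitness_parse : String := "a_b-1"
def pvDiffWitnessOut_parse : (List (String × String)) × (List (String × String)) :=
  ([("b", "1")], [("a_b", "1")])

-- ===== CLAIM (what is proved, stated in full; the proofs are below) =====
def Claim_unchanged_parse : Prop := ∀ (phenotype : String), Dom_parse phenotype → Spec_parse phenotype (parse phenotype)
def Claim_changed_parse : Prop := Dom_parse (pvDiffWitness_parse) ∧ D_parse (pvDiffWitness_parse) ∧ parse (pvDiffWitness_parse) = pvDiffWitnessOut_parse.1 ∧ parse_alt (pvDiffWitness_parse) = pvDiffWitnessOut_parse.2 ∧ pvDiffWitnessOut_parse.1 ≠ pvDiffWitnessOut_parse.2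
def Claim_exact_parse : Prop := ∀ (phenotype : String), Dom_parse phenotype → D_parse phenotype → parse phenotype ≠ parse_alt phenotype

-- ===== LEMMAS AND PROOFS =====

-- proof-side vocabulary
def pvTag (t : List Char) : Bool := PySem.Chars.isIn ['-'] t
def pvK (t : List Char) : Option (List Char) := if pvTag t then some (t.takeWhile (· ≠ '-')) else none
def pvV (t : List Char) : List Char := if pvTag t then (t.dropWhile (· ≠ '-')).drop 1 else t
def pvM (ts : List (List Char)) : Nat := ts.length - (ts.reverse.takeWhile (fun t => !pvTag t)).length

-- running prefix after B processes a token block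
def pvFpre : List Char → List (List Char) → List Char
  | pre, [] => pre
  | pre, t :: rest => if pvTag t then pvFpre [] rest else pvFpre (pre ++ t ++ ['_']) rest

-- the first piece of Python's t.split('-') is the maximal dash-free prefix
theorem pv_splitOn_go_first (c : Char) : ∀ (fuel : Nat) (l cur : List Char) (acc : List (List Char)),
    l.length < fuel → ∃ rest, PySem.Chars.splitOn.go [c] fuel l cur acc =
      acc.reverse ++ (cur.reverse ++ l.takeWhile (· ≠ c)) :: rest := by
  intro fuel
  induction fuel with
  | zero => intro l cur acc h; omega
  | succ n ih =>
    intro l cur acc h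
    match l with
    | [] => exact ⟨[], by simp [PySem.Chars.splitOn.go]⟩
    | c' :: rest =>
      by_cases hc : c = c'
      · subst hc
        have hpre : List.isPrefixOf [c] (c :: rest) = true := by simp [List.isPrefixOf]
        obtain ⟨r, hr⟩ := ih rest [] (cur.reverse :: acc) (by simp at h ⊢; omega)
        refine ⟨rest.takeWhile (· ≠ c) :: r, ?_⟩
        rw [PySem.Chars.splitOn.go]
        simp [hpre, hr]
      · have hpre : List.isPrefixOf [c] (c' :: rest) = false := by
          simp [List.isPrefixOf]; exact fun hh => hc hh
        obtain ⟨r, hr⟩ := ih rest (c' :: cur) acc (by simp at h ⊢; omega)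
        refine ⟨r, ?_⟩
        rw [PySem.Chars.splitOn.go]
        simp [hpre, hr, Ne.symm hc]

theorem pv_split_head (t : List Char) (c : Char) :
    (PySem.Chars.splitOn t [c]).headD [] = t.takeWhile (· ≠ c) := by
  obtain ⟨r, hr⟩ := pv_splitOn_go_first c (t.length + 1) t [] [] (by omega)
  simp [PySem.Chars.splitOn, hr]

theorem pv_drop_takeWhile (l : List Char) (p : Char → Bool) :
    l.drop ((l.takeWhile p).length + 1) = (l.dropWhile p).drop 1 := by
  have h1 : l.drop (l.takeWhile p).length = l.dropWhile p := by
    have h := List.takeWhile_append_dropWhile (p := p) (l := l)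
    calc l.drop (l.takeWhile p).length
        = (l.takeWhile p ++ l.dropWhile p).drop (l.takeWhile p).length := by rw [h]
      _ = l.dropWhile p := List.drop_left
  rw [← h1, List.drop_drop]

theorem pv_tokenizeA_eq (ts : List (List Char)) :
    pvTokenizeA ts = (ts.map pvK, ts.map pvV) := by
  unfold pvTokenizeA
  rw [PySem.List.foldl_congr_mem ts _ (fun acc t => (acc.1 ++ [pvK t], acc.2 ++ [pvV t])) (([], []))
    ?_]
  · rw [PySem.List.foldl_prod_mk (f := fun a t => a ++ [pvK t]) (g := fun a t => a ++ [pvV t])]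
    rw [PySem.List.foldl_append_singleton_eq_map, PySem.List.foldl_append_singleton_eq_map]
    simp
  · intro acc t _
    by_cases ht : PySem.Chars.isIn ['-'] t = true
    · have hslice : PySem.List.slice t (some (((t.takeWhile (· ≠ '-')).length : Int) + 1)) none =
          (t.dropWhile (· ≠ '-')).drop 1 := by
        rw [PySem.List.slice_from t
          (a := ((t.takeWhile (· ≠ '-')).length : Int) + 1) (by omega)]
        have : (((t.takeWhile (· ≠ '-')).length : Int) + 1).toNat =
            (t.takeWhile (· ≠ '-')).length + 1 := by omega
        rw [this, pv_drop_takeWhile]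
      simp only [ht, if_true, pv_split_head]
      simp [pvK, pvV, pvTag, ht]
      simpa using hslice
    · simp [pvK, pvV, pvTag, ht]

theorem pv_popA_eq (ts : List (List Char)) : ∀ fuel sfx, ts.length ≤ fuel →
    pvPopA fuel (ts.map pvK) (ts.map pvV) sfx =
      ((ts.take (pvM ts)).map pvK, (ts.take (pvM ts)).map pvV, (ts.drop (pvM ts)).map pvV ++ sfx) := by
  induction ts using List.reverseRecOn with
  | nil => intro fuel sfx _; cases fuel <;> simp [pvPopA, pvM]
  | append_singleton xs t ih =>
    intro fuel sfx hle
    simp only [List.length_append, List.length_cons, List.length_nil] at hle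
    obtain ⟨f, rfl⟩ : ∃ f, fuel = f + 1 := ⟨fuel - 1, by omega⟩
    have hrev : (xs ++ [t]).reverse = t :: xs.reverse := by simp
    by_cases ht : pvTag t
    · have hm : pvM (xs ++ [t]) = xs.length + 1 := by
        simp [pvM, hrev, ht]
      have hlast : ((xs ++ [t]).map pvK).getLast? = some (pvK t) := by simp
      have hK : pvK t = some (t.takeWhile (· ≠ '-')) := by simp [pvK, ht]
      rw [pvPopA]
      rw [if_neg (by rw [hlast, hK]; simp)]
      simp [hm, List.take_of_length_le, List.drop_of_length_le]
    · have hrun : (xs.reverse.takeWhile fun u => !pvTag u).length ≤ xs.length := by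
        calc (xs.reverse.takeWhile fun u => !pvTag u).length ≤ xs.reverse.length :=
              (List.takeWhile_prefix _).length_le
          _ = xs.length := List.length_reverse
      have hm : pvM (xs ++ [t]) = pvM xs := by
        simp only [pvM, hrev, List.takeWhile_cons, ht]
        simp
      have hmle : pvM xs ≤ xs.length := by simp [pvM]
      have hK : pvK t = none := by simp [pvK, ht]
      have hlast : ((xs ++ [t]).map pvK).getLast? = some none := by simp [hK]
      rw [pvPopA, if_pos hlast]
      have hdl1 : ((xs ++ [t]).map pvK).dropLast = xs.map pvK := by simp
      have hdl2 : ((xs ++ [t]).map pvV).dropLast = xs.map pvV := by simp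
      have hgl : ((xs ++ [t]).map pvV).getLast?.getD [] = pvV t := by simp
      rw [hdl1, hdl2, hgl, ih f (pvV t :: sfx) (by omega)]
      rw [hm, List.take_append_of_le_length hmle, List.drop_append_of_le_length hmle]
      simp

theorem pv_prefixA_length (l : List (Option (List Char) × List Char)) : ∀ pre,
    (pvPrefixA pre l).length = l.length := by
  induction l with
  | nil => intro pre; simp [pvPrefixA]
  | cons a rest ih =>
    intro pre
    obtain ⟨k?, v⟩ := a
    cases k? <;> simp [pvPrefixA, ih]

-- A's kept pairs, as the flatMap its collection loop computes
def pvGa (kv : Option (List Char) × List Char) : List (String × String) :=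
  match kv.1 with
  | some k => [(String.ofList k, String.ofList kv.2)]
  | none => []

theorem pv_collect_eq (l : List (Option (List Char) × List Char)) :
    l.foldl (fun acc kv =>
      match kv.1 with
      | some k => acc ++ [(String.ofList k, String.ofList kv.2)]
      | none => acc) [] = l.flatMap pvGa := by
  rw [PySem.List.foldl_congr_mem l _ (fun acc kv => acc ++ pvGa kv) [] ?_]
  · rw [PySem.List.foldl_append_eq_flatMap]
    simp
  · intro acc kv _
    obtain ⟨k?, v⟩ := kv
    cases k? <;> simp [pvGa]

-- A's prefix loop + collection over a block equals B's streaming pass over that block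
theorem pv_prefix_emit (ts : List (List Char)) : ∀ pre,
    ((pvPrefixA pre (ts.map (fun t => (pvK t, pvV t)))).zip (ts.map pvV)).flatMap pvGa =
      pvEmitB pre ts := by
  induction ts with
  | nil => intro pre; simp [pvPrefixA, pvEmitB]
  | cons t rest ih =>
    intro pre
    rw [List.map_cons, List.map_cons]
    by_cases ht : pvTag t
    · have ht' : PySem.Chars.isIn ['-'] t = true := ht
      have hk : (pvK t, pvV t) = (some (t.takeWhile (· ≠ '-')), pvV t) := by simp [pvK, ht]
      rw [hk]
      simp only [pvPrefixA, List.zip_cons_cons, List.flatMap_cons, ih]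
      have hv : pvV t = (t.dropWhile (· ≠ '-')).drop 1 := by simp [pvV, ht]
      simp [pvGa, pvEmitB, ht', hv]
    · have ht' : PySem.Chars.isIn ['-'] t = false := by simpa [pvTag] using ht
      have hk : (pvK t, pvV t) = (none, pvV t) := by simp [pvK, ht]
      rw [hk]
      simp only [pvPrefixA, List.zip_cons_cons, List.flatMap_cons, ih]
      have hv : pvV t = t := by simp [pvV, ht]
      simp [pvGa, pvEmitB, ht', hv]

-- running prefix after B processes a token block
theorem pv_emitB_snoc (ts : List (List Char)) (t : List Char) : ∀ pre,
    pvEmitB pre (ts ++ [t]) = pvEmitB pre ts ++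
      (if pvTag t then
        [(String.ofList (pvFpre pre ts ++ t.takeWhile (· ≠ '-')),
          String.ofList ((t.dropWhile (· ≠ '-')).drop 1))]
      else []) := by
  induction ts with
  | nil =>
    intro pre
    by_cases ht : pvTag t
    · have ht' : PySem.Chars.isIn ['-'] t = true := ht
      simp [pvEmitB, pvFpre, ht, ht']
    · have ht' : PySem.Chars.isIn ['-'] t = false := by simpa [pvTag] using ht
      simp [pvEmitB, ht, ht']
  | cons u rest ih =>
    intro pre
    by_cases hu : pvTag u
    · have hu' : PySem.Chars.isIn ['-'] u = true := hu
      simp [pvEmitB, pvFpre, hu, hu', ih]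
    · have hu' : PySem.Chars.isIn ['-'] u = false := by simpa [pvTag] using hu
      simp [pvEmitB, pvFpre, hu, hu', ih]

theorem pv_fpre_snoc (ts : List (List Char)) (t : List Char) : ∀ pre,
    pvFpre pre (ts ++ [t]) = if pvTag t then [] else pvFpre pre ts ++ t ++ ['_'] := by
  induction ts with
  | nil => intro pre; by_cases ht : pvTag t <;> simp [pvFpre, ht]
  | cons u rest ih =>
    intro pre
    by_cases hu : pvTag u <;> simp [pvFpre, hu, ih]

theorem pv_fpre_last_tag (l : List (List Char)) (h : l ≠ []) (ht : pvTag (l.getLast h) = true)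
    (pre : List Char) : pvFpre pre l = [] := by
  rw [← List.dropLast_append_getLast h, pv_fpre_snoc, if_pos ht]

theorem pv_fpre_last_plain (l : List (List Char)) (h : l ≠ []) (ht : pvTag (l.getLast h) = false)
    (pre : List Char) : pvFpre pre l ≠ [] := by
  rw [← List.dropLast_append_getLast h, pv_fpre_snoc, if_neg (by simp [ht])]
  simp

-- decomposition of the token list at the start of the trailing plain run
theorem pv_split_at_m (ts : List (List Char)) :
    ts.take (pvM ts) = (ts.reverse.dropWhile (fun t => !pvTag t)).reverse ∧
      ts.drop (pvM ts) = (ts.reverse.takeWhile (fun t => !pvTag t)).reverse := by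
  have hsplit := List.takeWhile_append_dropWhile (p := fun t => !pvTag t) (l := ts.reverse)
  set w := ts.reverse.takeWhile (fun t => !pvTag t) with hw
  set d := ts.reverse.dropWhile (fun t => !pvTag t) with hd
  have hts : d.reverse ++ w.reverse = ts := by
    rw [← List.reverse_append, hsplit, List.reverse_reverse]
  have hlen : w.length + d.length = ts.length := by
    simpa using congrArg List.length hsplit
  have hm : pvM ts = d.reverse.length := by
    simp only [pvM, ← hw, List.length_reverse]
    omega
  refine ⟨?_, ?_⟩
  · rw [hm, ← hts, List.take_left]
  · rw [hm, ← hts, List.drop_left]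

-- proof-side normal forms of the two ports
def pvTs (s : String) : List (List Char) := PySem.Chars.splitOn s.toList ['_']
def pvBs (s : String) : List (List Char) := (pvTs s).take (pvM (pvTs s))
def pvSufPart (s : String) : List (String × String) :=
  if PySem.Chars.join ['_'] ((pvTs s).drop (pvM (pvTs s))) ≠ [] then
    [("suffix", String.ofList (PySem.Chars.join ['_'] ((pvTs s).drop (pvM (pvTs s)))))]
  else []
def pvApairs (bs : List (List Char)) : List (String × String) :=
  ((pvPrefixA [] ((bs.map pvK).zip (bs.map pvV)).dropLast ++
      (bs.map pvK).drop (bs.length - 1)).zip (bs.map pvV)).flatMap pvGa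

theorem pv_drop_all_plain (ts : List (List Char)) : ∀ u ∈ ts.drop (pvM ts), pvTag u = false := by
  intro u hu
  rw [(pv_split_at_m ts).2, List.mem_reverse] at hu
  have h2 := List.mem_takeWhile_imp hu
  simpa using h2

theorem pv_drop_plain (s : String) : ((pvTs s).drop (pvM (pvTs s))).map pvV =
    (pvTs s).drop (pvM (pvTs s)) := by
  have hplain : ∀ u ∈ (pvTs s).drop (pvM (pvTs s)), pvV u = u := by
    intro u hu
    simp [pvV, pv_drop_all_plain (pvTs s) u hu]
  rw [List.map_congr_left hplain]
  simp

theorem pv_parse_eq (s : String) : parse s = pvApairs (pvBs s) ++ pvSufPart s := by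
  have hts : PySem.Chars.splitOn s.toList ['_'] = pvTs s := rfl
  unfold parse
  simp only [pv_tokenizeA_eq]
  rw [hts]
  rw [pv_popA_eq _ _ _ (by simp)]
  simp only [pv_collect_eq]
  rw [List.append_nil, pv_drop_plain]
  simp only [pvApairs, pvBs, pvSufPart, List.length_map]
  split_ifs <;> simp

theorem pv_parse_alt_eq (s : String) : parse_alt s = pvEmitB [] (pvBs s) ++ pvSufPart s := by
  unfold parse_alt
  simp only [pvBs, pvSufPart, pvTs, pvM, pvTag]

-- A's prefix/collect pass over a block ending in a tag, in closed form
theorem pv_Apairs_block (init : List (List Char)) (t : List Char) (ht : pvTag t = true) :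
    pvApairs (init ++ [t]) = pvEmitB [] init ++
      [(String.ofList (t.takeWhile (· ≠ '-')), String.ofList ((t.dropWhile (· ≠ '-')).drop 1))] := by
  unfold pvApairs
  have hmapK : (init ++ [t]).map pvK = init.map pvK ++ [pvK t] := by simp
  have hmapV : (init ++ [t]).map pvV = init.map pvV ++ [pvV t] := by simp
  have hzip1 : ((init ++ [t]).map pvK).zip ((init ++ [t]).map pvV) =
      (init.map pvK).zip (init.map pvV) ++ [(pvK t, pvV t)] := by
    rw [hmapK, hmapV, List.zip_append (by simp)]
    rfl
  have hdropl : (((init ++ [t]).map pvK).zip ((init ++ [t]).map pvV)).dropLast =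
      (init.map pvK).zip (init.map pvV) := by
    rw [hzip1, List.dropLast_concat]
  have hdrop2 : ((init ++ [t]).map pvK).drop ((init ++ [t]).length - 1) = [pvK t] := by
    rw [hmapK]
    simp only [List.length_append, List.length_cons, List.length_nil]
    rw [List.drop_left' (by simp)]
  rw [hdropl, hdrop2, hmapV, List.zip_append (by simp [pv_prefixA_length]), List.flatMap_append]
  rw [List.zip_map', pv_prefix_emit]
  have : pvK t = some (t.takeWhile (· ≠ '-')) := by simp [pvK, ht]
  simp [pvGa, this, pvV, ht]

theorem pv_emitB_block (init : List (List Char)) (t : List Char) (ht : pvTag t = true) :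
    pvEmitB [] (init ++ [t]) = pvEmitB [] init ++
      [(String.ofList (pvFpre [] init ++ t.takeWhile (· ≠ '-')),
        String.ofList ((t.dropWhile (· ≠ '-')).drop 1))] := by
  rw [pv_emitB_snoc, if_pos ht]

-- the block ends in a tag (or is empty), and its last-but-one entry is D_'s token
theorem pv_block_cases (ts : List (List Char)) :
    ts.take (pvM ts) = [] ∨ ∃ init t, ts.take (pvM ts) = init ++ [t] ∧ pvTag t = true := by
  obtain ⟨htake, -⟩ := pv_split_at_m ts
  cases hd : ts.reverse.dropWhile (fun t => !pvTag t) with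
  | nil => left; rw [htake, hd]; rfl
  | cons u d' =>
    right
    refine ⟨d'.reverse, u, ?_, ?_⟩
    · rw [htake, hd]; simp
    · have h1 := List.head_dropWhile_not (fun t => !pvTag t) (l := ts.reverse) (by simp [hd])
      simpa [hd] using h1

theorem pv_block_len (s : String) (init : List (List Char)) (t : List Char)
    (hbt : (pvTs s).take (pvM (pvTs s)) = init ++ [t]) :
    init.length + 1 = pvM (pvTs s) := by
  have hmlen : pvM (pvTs s) ≤ (pvTs s).length := by simp [pvM]
  have h := congrArg List.length hbt
  simp [List.length_take, Nat.min_eq_left hmlen] at h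
  omega


-- pvM in terms of the position of the LAST tag token
theorem pv_M_char (ts : List (List Char)) (i : Nat) (hi : i < ts.length)
    (htag : pvTag (ts[i]?.getD []) = true)
    (hafter : ∀ j, j < ts.length → i < j → pvTag (ts[j]?.getD []) = false) :
    pvM ts = i + 1 := by
  have hsplit : ts.reverse = (ts.drop (i + 1)).reverse ++ (ts.take (i + 1)).reverse := by
    conv_lhs => rw [← List.take_append_drop (i + 1) ts]
    rw [List.reverse_append]
  have hallA : ∀ u ∈ (ts.drop (i + 1)).reverse, (fun t => !pvTag t) u = true := by
    intro u hu
    rw [List.mem_reverse] at hu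
    obtain ⟨j, hj⟩ := List.mem_iff_getElem?.mp hu
    rw [List.getElem?_drop] at hj
    have hlt : i + 1 + j < ts.length := by
      by_contra hge
      rw [List.getElem?_eq_none (by omega)] at hj
      simp at hj
    have hp := hafter (i + 1 + j) hlt (by omega)
    rw [hj] at hp
    simpa using hp
  have htw : ts.reverse.takeWhile (fun t => !pvTag t) =
      (ts.drop (i + 1)).reverse ++ ((ts.take (i + 1)).reverse.takeWhile (fun t => !pvTag t)) := by
    rw [hsplit, List.takeWhile_append_of_pos hallA]
  have hBne : (ts.take (i + 1)).reverse ≠ [] := by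
    intro h0
    have hlen0 := congrArg List.length h0
    rw [List.length_reverse, List.length_take, List.length_nil] at hlen0
    omega
  have hlast : (ts.take (i + 1)).getLast? = some (ts[i]?.getD []) := by
    rw [List.getLast?_eq_getElem?, List.length_take]
    have hmin : min (i + 1) ts.length = i + 1 := by omega
    rw [hmin, Nat.add_sub_cancel, List.getElem?_take, if_pos (by omega)]
    rw [List.getElem?_eq_getElem hi]
    simp
  have htwB : (ts.take (i + 1)).reverse.takeWhile (fun t => !pvTag t) = [] := by
    rw [← List.cons_head_tail hBne, List.takeWhile_cons]
    have hh : (ts.take (i + 1)).reverse.head hBne = ts[i]?.getD [] := by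
      rw [List.head_reverse]
      have hgl := List.getLast?_eq_some_getLast (l := ts.take (i + 1))
        (h := by intro h0; rw [h0] at hlast; simp at hlast)
      rw [hgl] at hlast
      exact (Option.some.injEq _ _).mp hlast
    rw [hh, htag]
    simp
  unfold pvM
  rw [htw, htwB, List.append_nil, List.length_reverse, List.length_drop]
  omega

theorem pv_tag_contains (t : List Char) : PySem.Chars.isIn ['-'] t = t.contains '-' := by
  by_cases h : '-' ∈ t
  · rw [(PySem.Chars.isIn_iff_infix _ _).mpr ((List.singleton_infix_iff _ _).mpr h)]
    simp [h]
  · rw [(PySem.Chars.isIn_eq_false_iff _ _).mpr (fun hc => h ((List.singleton_infix_iff _ _).mp hc))]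
    simp [h]

theorem pv_D_reduce (s : String) : D_parse s ↔ (∃ i, i < (pvTs s).length ∧ 1 ≤ i ∧
    pvTag ((pvTs s)[i]?.getD []) = true ∧
    pvTag ((pvTs s)[i - 1]?.getD []) = false ∧
    ∀ j, j < (pvTs s).length → i < j →
      pvTag ((pvTs s)[j]?.getD []) = false) := by
  unfold D_parse pvTs pvTag
  simp [pv_tag_contains]

theorem pv_D_iff (s : String) : D_parse s ↔
    2 ≤ pvM (pvTs s) ∧ pvTag (((pvTs s))[pvM (pvTs s) - 2]?.getD []) = false := by
  rw [pv_D_reduce]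
  constructor
  · rintro ⟨i, hlt, h1, htag, hprev, hafter⟩
    have hm := pv_M_char (pvTs s) i hlt htag (fun j hj hij => hafter j hj hij)
    rw [hm]
    refine ⟨by omega, ?_⟩
    have hidx : i + 1 - 2 = i - 1 := by omega
    rw [hidx]
    exact hprev
  · rintro ⟨hm2, hplain⟩
    rcases pv_block_cases (pvTs s) with hnil | ⟨init, t, hbt, ht⟩
    · exfalso
      have hmlen : pvM (pvTs s) ≤ (pvTs s).length := by simp [pvM]
      have h := congrArg List.length hnil
      simp [List.length_take, Nat.min_eq_left hmlen] at h
      omega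
    · have hmlen : pvM (pvTs s) ≤ (pvTs s).length := by simp [pvM]
      have hlen := pv_block_len s init t hbt
      have htagm : pvTag ((pvTs s)[pvM (pvTs s) - 1]?.getD []) = true := by
        have hgt : (pvTs s)[pvM (pvTs s) - 1]? =
            ((pvTs s).take (pvM (pvTs s)))[pvM (pvTs s) - 1]? := by
          rw [List.getElem?_take, if_pos (by omega)]
        have hidx : pvM (pvTs s) - 1 = init.length := by omega
        rw [hgt, hbt, hidx, List.getElem?_concat_length]
        simpa using ht
      refine ⟨pvM (pvTs s) - 1, by omega, by omega, htagm, ?_, ?_⟩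
      · have hidx : pvM (pvTs s) - 1 - 1 = pvM (pvTs s) - 2 := by omega
        rw [hidx]
        exact hplain
      · intro j hj hij
        have hget : (pvTs s)[j]? = ((pvTs s).drop (pvM (pvTs s)))[j - pvM (pvTs s)]? := by
          rw [List.getElem?_drop]
          congr 1
          omega
        obtain ⟨u, hu⟩ : ∃ u, (pvTs s)[j]? = some u := ⟨_, List.getElem?_eq_getElem hj⟩
        have humem : u ∈ (pvTs s).drop (pvM (pvTs s)) :=
          List.mem_of_getElem? (by rw [← hget]; exact hu)
        have hp := pv_drop_all_plain (pvTs s) u humem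
        rw [hu]
        simpa using hp

-- D_'s token is the last element of init (when the block has at least two entries)
theorem pv_last_init (ts init : List (List Char)) (t : List Char)
    (hbs : ts.take (pvM ts) = init ++ [t]) (h2 : 2 ≤ pvM ts) :
    ts[pvM ts - 2]?.getD [] = init.getLast?.getD [] := by
  have hmlen : pvM ts ≤ ts.length := by simp [pvM]
  have hlen : init.length + 1 = pvM ts := by
    have h := congrArg List.length hbs
    simp [List.length_take, Nat.min_eq_left hmlen] at h
    omega
  rcases init.eq_nil_or_concat with rfl | ⟨i2, u, rfl⟩
  · simp at hlen; omega
  · have hgt : ts[pvM ts - 2]? = (ts.take (pvM ts))[pvM ts - 2]? := by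
      rw [List.getElem?_take, if_pos (by omega)]
    have hi : pvM ts - 2 = i2.length := by simp at hlen ⊢; omega
    rw [hgt, hbs, hi, List.getElem?_append_left (by simp)]
    simp

-- ===== VERDICT (by name: the statement is the Claim_ definition above) =====
theorem parse_spec : Claim_unchanged_parse := by
  intro s _ hD
  have key : pvApairs (pvBs s) = pvEmitB [] (pvBs s) := by
    rcases pv_block_cases (pvTs s) with hnil | ⟨init, t, hbt, ht⟩
    · rw [show pvBs s = [] from hnil]
      simp [pvApairs, pvPrefixA, pvEmitB]
    · have hbs : pvBs s = init ++ [t] := hbt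
      rw [hbs, pv_Apairs_block _ _ ht, pv_emitB_block _ _ ht]
      have hfp : pvFpre [] init = [] := by
        rw [pv_D_iff] at hD
        push Not at hD
        by_cases hm : 2 ≤ pvM (pvTs s)
        · have htag' := hD hm
          have hlast := pv_last_init (pvTs s) init t hbt hm
          have hlen := pv_block_len s init t hbt
          have hne : init ≠ [] := by
            intro h0
            subst h0
            simp at hlen
            omega
          have htag : pvTag (init.getLast hne) = true := by
            have hgl : init.getLast?.getD [] = init.getLast hne := by
              rw [List.getLast?_eq_some_getLast]
              rfl
            rw [hlast, hgl] at htag'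
            simpa using htag'
          exact pv_fpre_last_tag init hne htag []
        · have hlen := pv_block_len s init t hbt
          have : init = [] := by
            have : init.length = 0 := by omega
            simpa using this
          subst this
          simp [pvFpre]
      rw [hfp]
      simp
  rw [pv_parse_eq, pv_parse_alt_eq, key]

theorem parse_changed : Claim_changed_parse := by unfold Claim_changed_parse; decide

theorem parse_tight : Claim_exact_parse := by
  intro s _ hD
  rw [pv_D_iff] at hD
  obtain ⟨hm, hplain⟩ := hD
  rw [pv_parse_eq, pv_parse_alt_eq]
  rcases pv_block_cases (pvTs s) with hnil | ⟨init, t, hbt, ht⟩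
  · exfalso
    have hmlen : pvM (pvTs s) ≤ (pvTs s).length := by simp [pvM]
    have h := congrArg List.length hnil
    simp [List.length_take, Nat.min_eq_left hmlen] at h
    omega
  · have hbs : pvBs s = init ++ [t] := hbt
    rw [hbs, pv_Apairs_block _ _ ht, pv_emitB_block _ _ ht]
    have hlen := pv_block_len s init t hbt
    have hne : init ≠ [] := by
      intro h0
      subst h0
      simp at hlen
      omega
    have hlast := pv_last_init (pvTs s) init t hbt hm
    have htagf : pvTag (init.getLast hne) = false := by
      have hgl : init.getLast?.getD [] = init.getLast hne := by
        rw [List.getLast?_eq_some_getLast]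
        rfl
      rw [hlast, hgl] at hplain
      exact hplain
    have hq : pvFpre [] init ≠ [] := pv_fpre_last_plain init hne htagf []
    intro heq
    rw [List.append_assoc, List.append_assoc] at heq
    have h1 := List.append_cancel_left heq
    simp only [List.singleton_append, List.cons.injEq, Prod.mk.injEq] at h1
    have h2 := String.ofList_inj.mp h1.1.1
    have h3 := congrArg List.length h2
    simp at h3
    exact hq h3
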